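-- pv_equiv track=rewrite | github.com/BH1SCW/Leetcode-1 | Company/Atlassian/WorkSchedule.py | findSchedules
-- ===== SOURCE A (Python) =====
-- def findSchedules(workHours, dayHours, pattern):
--     num_days, allocated_hours = 0, 0
--     for d in pattern:
--         if d == '?':
--             num_days += 1
--         else:
--             allocated_hours += int(d)
--     ans = []
--     def dfs(hours, days, index, path, ans):
--         if index == 7:
--             if hours == 0:
--                 ans.append(path)
--             return
--         if dayHours * days < hours:
--             return
--         if pattern[index] == '?':
--             for h in range(0, min(dayHours + 1, hours + 1)):
--                 dfs(hours - h, days - 1, index + 1, path + str(h), ans)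
--         else:
--             dfs(hours, days, index + 1, path + pattern[index], ans)
--     dfs(workHours - allocated_hours, num_days, 0, '', ans)
--     return ans
-- ===== SOURCE B (Python) =====
-- def findSchedules(workHours, dayHours, pattern):
--     # Level-wise (breadth-first) enumeration of the '?'-hour tuples instead of A's DFS recursion,
--     # with a single up-front feasibility early-exit.
--     allocated = sum(int(d) for d in pattern if d != '?')
--     num_days = pattern.count('?')
--     needed = workHours - allocated
--     if dayHours * num_days < needed:
--         return []
--     week = pattern[:7]
--     partials = [(0, [])]
--     for _ in range(week.count('?')):
--         partials = [(s + h, hs + [h]) for s, hs in partials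
--                     for h in range(min(dayHours, needed - s) + 1)]
--     ans = []
--     for s, hs in partials:
--         if s == needed:
--             it = iter(hs)
--             ans.append(''.join(str(next(it)) if c == '?' else c for c in week))
--     return ans
-- ===== Notes on version B (the rewrite author's own statement) =====
-- stated objective: alternative
-- what changed: Replaces A's recursive DFS with per-node pruning by a single up-front feasibility early-exit (dayHours * num_free < needed) followed by an iterative breadth-first expansion: a list of (sum, hours-so-far) partials is grown level by level over the '?' slots of the first seven days (each hour capped by min(dayHours, needed-sum)), then the partials with the exact needed sum are rendered into schedule strings in one final pass.
import Mathlib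
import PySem

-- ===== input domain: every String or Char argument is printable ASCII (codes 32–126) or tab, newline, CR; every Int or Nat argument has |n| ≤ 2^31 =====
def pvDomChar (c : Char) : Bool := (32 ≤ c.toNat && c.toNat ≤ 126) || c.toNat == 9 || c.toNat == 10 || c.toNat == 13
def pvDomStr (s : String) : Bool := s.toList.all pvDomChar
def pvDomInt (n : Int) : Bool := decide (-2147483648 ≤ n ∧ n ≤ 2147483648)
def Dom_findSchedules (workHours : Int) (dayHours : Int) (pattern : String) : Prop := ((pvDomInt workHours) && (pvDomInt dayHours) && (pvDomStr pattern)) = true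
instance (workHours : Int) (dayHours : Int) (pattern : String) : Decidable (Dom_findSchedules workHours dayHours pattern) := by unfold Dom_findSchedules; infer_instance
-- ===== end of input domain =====

-- B replaces A's pruned DFS recursion by an up-front feasibility early-exit followed by an iterative
-- level-wise expansion of partial hour tuples; equivalence of return values is proved on Pre_.
-- Paths/outputs are modelled as List Char, converted by String.ofList on append to ans.

-- ===== PORT A =====
-- dfs(hours, days, index, path, ans); the loop counter is ported as fuel = 7 - index, so index = 7 - fuel
-- and the 'index == 7' test is fuel = 0.
def dfsA (dayHours : Int) (pattern : String) : Nat → Int → Int → List Char → List (List Char) → List (List Char)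
  | 0, hours, _days, _path, ans => if hours = 0 then ans ++ [_path] else ans
  | fuel+1, hours, days, path, ans =>
    if dayHours * days < hours then ans
    else
      match PySem.Str.pyGet? pattern ((6 - fuel : Nat) : Int) with
      | none => ans  -- Python raises IndexError here; excluded by Pre_findSchedules (length ≥ 7)
      | some c =>
        if c = '?' then
          (PySem.List.pyRange 0 (min (dayHours + 1) (hours + 1)) 1).foldl
            (fun acc h => dfsA dayHours pattern fuel (hours - h) (days - 1) (path ++ PySem.Int.toChars h) acc) ans
        else dfsA dayHours pattern fuel hours days (path ++ [c]) ans

def findSchedules (workHours : Int) (dayHours : Int) (pattern : String) : List String :=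
  let nd_al := pattern.toList.foldl
    (fun (p : Int × Int) d =>
      if d = '?' then (p.1 + 1, p.2)
      else (p.1, p.2 + (PySem.Int.ofStr? (String.ofList [d])).getD 0)) (0, 0)
  -- int(d) raises ValueError on a non-digit; excluded by Pre_findSchedules, so .getD 0 is unreachable inside Pre_
  (dfsA dayHours pattern 7 (workHours - nd_al.2) nd_al.1 [] []).map String.ofList

-- ===== PORT B =====
-- ''.join(str(next(it)) if c == '?' else c for c in week) with it = iter(hs)
def fillB : List Char → List Int → List Char
  | [], _ => []
  | c :: rest, hs =>
    if c = '?' then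
      match hs with
      | [] => []  -- next(it) exhausted; unreachable: every tuple has length = number of '?' in week
      | h :: hs' => PySem.Int.toChars h ++ fillB rest hs'
    else c :: fillB rest hs

-- the 'for _ in range(week.count('?'))' loop rebuilding partials
def levelsB (dayHours needed : Int) : Nat → List (Int × List Int) → List (Int × List Int)
  | 0, parts => parts
  | n+1, parts =>
    levelsB dayHours needed n
      (parts.flatMap (fun p =>
        (PySem.List.pyRange 0 (min dayHours (needed - p.1) + 1) 1).map (fun h => (p.1 + h, p.2 ++ [h]))))

def findSchedules_alt (workHours : Int) (dayHours : Int) (pattern : String) : List String :=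
  let allocated : Int := pattern.toList.foldl
    (fun a d => if d ≠ '?' then a + (PySem.Int.ofStr? (String.ofList [d])).getD 0 else a) 0
  let numDays : Int := (pattern.toList.count '?' : Int)
  let needed := workHours - allocated
  if dayHours * numDays < needed then []
  else
    let week := PySem.List.slice pattern.toList none (some 7)   -- pattern[:7]
    let numFree := week.count '?'
    let partials := levelsB dayHours needed numFree [(0, [])]
    partials.foldl (fun ans p => if p.1 = needed then ans ++ [String.ofList (fillB week p.2)] else ans) []

-- ===== PRECONDITION & SPEC =====
def pvDigitVal (c : Char) : Int := (c.toNat : Int) - 48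
def pvAlloc (pattern : String) : Int :=
  (pattern.toList.filter (· ≠ '?')).foldl (fun a c => a + pvDigitVal c) 0

-- Pre_ excludes patterns containing a character that is neither a digit nor '?' (int(d) raises ValueError there),
-- and patterns shorter than 7 characters EXCEPT those on which A returns [] without reaching index len(pattern)
-- (top-level prune, or a '?' day with an empty hour range); on the other short patterns A raises IndexError.
def Pre_findSchedules (workHours : Int) (dayHours : Int) (pattern : String) : Prop :=
  pattern.toList.all (fun c => c == '?' || (decide (48 ≤ c.toNat) && decide (c.toNat ≤ 57))) = true ∧
  (7 ≤ pattern.toList.length ∨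
   dayHours * (pattern.toList.count '?' : Int) < workHours - pvAlloc pattern ∨
   (1 ≤ pattern.toList.count '?' ∧ (dayHours < 0 ∨ workHours - pvAlloc pattern < 0)))
instance (workHours : Int) (dayHours : Int) (pattern : String) : Decidable (Pre_findSchedules workHours dayHours pattern) := by
  unfold Pre_findSchedules; infer_instance

def pvWitness_findSchedules : Int × Int × String := (10, 4, "0??0?00")

def Spec_findSchedules (workHours : Int) (dayHours : Int) (pattern : String) (out : List String) : Prop :=
  out = findSchedules_alt workHours dayHours pattern
instance (workHours : Int) (dayHours : Int) (pattern : String) (out : List String) : Decidable (Spec_findSchedules workHours dayHours pattern out) := by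
  unfold Spec_findSchedules; infer_instance

-- ===== CLAIM (what is proved, stated in full; the proofs are below) =====
def Claim_equal_findSchedules : Prop := ∀ (workHours : Int) (dayHours : Int) (pattern : String), Dom_findSchedules workHours dayHours pattern → Pre_findSchedules workHours dayHours pattern → Spec_findSchedules workHours dayHours pattern (findSchedules workHours dayHours pattern)

-- ===== LEMMAS AND PROOFS =====

-- the common mathematical description both ports are reduced to: completions of the remaining
-- week suffix S with the remaining hours
def pvE (dayH : Int) : List Char → Int → List (List Char)
  | [], hours => if hours = 0 then [[]] else []
  | c :: rest, hours =>
    if c = '?' then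
      (PySem.List.pyRange 0 (min (dayH + 1) (hours + 1)) 1).flatMap
        (fun h => (pvE dayH rest (hours - h)).map (fun s => PySem.Int.toChars h ++ s))
    else (pvE dayH rest hours).map (fun s => c :: s)

-- hour tuples only (B's partials, per-slot cap written with B's running hours)
def pvTup (dayH : Int) : Nat → Int → List (List Int)
  | 0, hours => if hours = 0 then [[]] else []
  | n+1, hours =>
    (PySem.List.pyRange 0 (min dayH hours + 1) 1).flatMap
      (fun h => (pvTup dayH n (hours - h)).map (fun t => h :: t))

lemma pvE_bound (dayH : Int) : ∀ (S : List Char) (hours : Int),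
    pvE dayH S hours ≠ [] → 0 ≤ hours ∧ hours ≤ dayH * (S.count '?' : Int) := by
  intro S
  induction S with
  | nil =>
      intro hours h
      by_cases h0 : hours = 0
      · subst h0; simp
      · simp [pvE, h0] at h
  | cons c rest ih =>
      intro hours h
      by_cases hc : c = '?'
      · subst hc
        rw [pvE, if_pos rfl, ne_eq, List.flatMap_eq_nil_iff] at h
        push_neg at h
        obtain ⟨x, hx, hne⟩ := h
        rw [PySem.List.mem_pyRange_one] at hx
        have hrest : pvE dayH rest (hours - x) ≠ [] := by
          intro hnil; simp [hnil] at hne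
        obtain ⟨h1, h2⟩ := ih (hours - x) hrest
        have hcnt : (List.count '?' ('?' :: rest) : Int) = (List.count '?' rest : Int) + 1 := by
          simp [List.count_cons]
        rw [hcnt]
        constructor
        · omega
        · have hxd : x ≤ dayH := by
            have hm := min_le_left (dayH + 1) (hours + 1); omega
          have hexp : dayH * ((List.count '?' rest : Int) + 1)
              = dayH * (List.count '?' rest : Int) + dayH := by ring
          linarith
      · rw [pvE, if_neg hc, ne_eq, List.map_eq_nil_iff] at h
        have := ih hours h
        rwa [List.count_cons_of_ne (fun he => hc he)]

lemma min_succ_succ (a b : Int) : min (a + 1) (b + 1) = min a b + 1 := by omega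

lemma pvE_fill (dayH : Int) : ∀ (S : List Char) (hours : Int),
    pvE dayH S hours = (pvTup dayH (S.count '?') hours).map (fillB S) := by
  intro S
  induction S with
  | nil =>
      intro hours
      by_cases h0 : hours = 0 <;> simp [pvE, pvTup, h0, fillB]
  | cons c rest ih =>
      intro hours
      by_cases hc : c = '?'
      · subst hc
        rw [pvE, if_pos rfl]
        have hcnt : List.count '?' ('?' :: rest) = rest.count '?' + 1 := by
          simp
        rw [hcnt, pvTup, min_succ_succ, List.map_flatMap]
        refine List.flatMap_congr (fun x hx => ?_)
        rw [ih]
        simp only [List.map_map]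
        apply List.map_congr_left
        intro t ht
        simp [fillB]
      · rw [pvE, if_neg hc, List.count_cons_of_ne (fun he => hc he), ih]
        simp only [List.map_map]
        apply List.map_congr_left
        intro t ht
        simp [fillB, hc]

lemma levelsB_append (dayH needed : Int) : ∀ n (l1 l2 : List (Int × List Int)),
    levelsB dayH needed n (l1 ++ l2) = levelsB dayH needed n l1 ++ levelsB dayH needed n l2 := by
  intro n
  induction n with
  | zero => intro l1 l2; rfl
  | succ m ih => intro l1 l2; rw [levelsB, List.flatMap_append, ih]; rfl

lemma levelsB_nil (dayH needed : Int) : ∀ n, levelsB dayH needed n [] = [] := by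
  intro n
  induction n with
  | zero => rfl
  | succ m ih => rw [levelsB]; simpa using ih

lemma levelsB_flat (dayH needed : Int) : ∀ n (l : List (Int × List Int)),
    levelsB dayH needed n l = l.flatMap (fun p => levelsB dayH needed n [p]) := by
  intro n l
  induction l with
  | nil => simp [levelsB_nil]
  | cons p l' ih =>
      have : p :: l' = [p] ++ l' := rfl
      rw [this, levelsB_append, ih]
      simp

lemma filter_flatMap {α β : Type} (l : List α) (f : α → List β) (p : β → Bool) :
    (l.flatMap f).filter p = l.flatMap (fun x => (f x).filter p) := by
  induction l with
  | nil => rfl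
  | cons x l' ih => simp [List.flatMap_cons, List.filter_append, ih]

lemma levelsT (dayH needed : Int) : ∀ n (s : Int) (hs : List Int),
    (levelsB dayH needed n [(s, hs)]).filter (fun p => decide (p.1 = needed))
      = (pvTup dayH n (needed - s)).map (fun t => (needed, hs ++ t)) := by
  intro n
  induction n with
  | zero =>
      intro s hs
      by_cases h : s = needed
      · subst h; simp [levelsB, pvTup]
      · have : ¬(needed - s = 0) := by omega
        simp [levelsB, pvTup, h, this]
  | succ m ih =>
      intro s hs
      rw [levelsB, List.flatMap_cons, List.flatMap_nil, List.append_nil, levelsB_flat,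
          List.flatMap_map, filter_flatMap]
      rw [pvTup, List.map_flatMap]
      refine List.flatMap_congr (fun x hx => ?_)
      rw [ih (s + x) (hs ++ [x])]
      have harg : needed - (s + x) = needed - s - x := by ring
      rw [harg]
      simp only [List.map_map]
      apply List.map_congr_left
      intro t ht
      simp

lemma alt_eq (workHours dayH : Int) (pattern : String)
    (hguard : ¬ dayH * (pattern.toList.count '?' : Int)
        < workHours - pattern.toList.foldl
            (fun a d => if d ≠ '?' then a + (PySem.Int.ofStr? (String.ofList [d])).getD 0 else a) 0) :
    findSchedules_alt workHours dayH pattern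
      = (pvE dayH (pattern.toList.take 7)
          (workHours - pattern.toList.foldl
            (fun a d => if d ≠ '?' then a + (PySem.Int.ofStr? (String.ofList [d])).getD 0 else a) 0)).map String.ofList := by
  unfold findSchedules_alt
  rw [if_neg hguard]
  have hweek : PySem.List.slice pattern.toList none (some 7) = pattern.toList.take 7 := by
    rw [PySem.List.slice_to pattern.toList (by norm_num)]
    rfl
  rw [hweek]
  rw [PySem.List.foldl_append_ite (p := fun p : Int × List Int => p.1 = _)]
  rw [levelsT]
  rw [sub_zero, pvE_fill]
  simp [List.map_map]

lemma dfsA_eq (dayH : Int) (pattern : String) (q : Int) (hq : 0 ≤ q)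
    (hlen : 7 ≤ pattern.toList.length) :
    ∀ fuel, fuel ≤ 7 → ∀ hours days path ans,
      days = (((pattern.toList.take 7).drop (7 - fuel)).count '?' : Int) + q →
      (0 ≤ dayH ∨ q = 0 ∨ '?' ∈ (pattern.toList.take 7).drop (7 - fuel) ∨ hours ≠ 0) →
      dfsA dayH pattern fuel hours days path ans
        = ans ++ (pvE dayH ((pattern.toList.take 7).drop (7 - fuel)) hours).map (fun s => path ++ s) := by
  intro fuel
  induction fuel with
  | zero =>
      intro _ hours days path ans hdays hH
      have hdrop : (pattern.toList.take 7).drop (7 - 0) = ([] : List Char) := by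
        apply List.drop_eq_nil_of_le
        simp [List.length_take]
      rw [hdrop, dfsA]
      by_cases h0 : hours = 0
      · subst h0; simp [pvE]
      · simp [pvE, h0]
  | succ fuel ih =>
      intro hle hours days path ans hdays hH
      have hf : fuel ≤ 7 := by omega
      have hwklen : (pattern.toList.take 7).length = 7 := by
        rw [List.length_take]; omega
      have hsplit : (pattern.toList.take 7).drop (7 - (fuel+1))
          = (pattern.toList.take 7)[6 - fuel]'(by rw [hwklen]; omega)
              :: (pattern.toList.take 7).drop (7 - fuel) := by
        have h1 : 7 - (fuel + 1) = 6 - fuel := by omega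
        have h2 : 7 - fuel = (6 - fuel) + 1 := by omega
        rw [h1, h2]
        exact List.drop_eq_getElem_cons (by rw [hwklen]; omega)
      set wk := pattern.toList.take 7 with hwkdef
      set c : Char := wk[6 - fuel]'(by rw [hwklen]; omega) with hcdef
      have hget : PySem.Str.pyGet? pattern ((6 - fuel : Nat) : Int) = some c := by
        rw [PySem.Str.pyGet?_natCast]
        rw [List.getElem?_eq_getElem (by omega)]
        congr 1
        rw [hcdef]
        simp [hwkdef, List.getElem_take]
      have hcount : (wk.drop (7 - (fuel+1))).count '?'
          = (c :: wk.drop (7 - fuel)).count '?' := by rw [hsplit]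
      have hred : dfsA dayH pattern (fuel+1) hours days path ans
          = if dayH * days < hours then ans
            else if c = '?' then
              (PySem.List.pyRange 0 (min (dayH + 1) (hours + 1)) 1).foldl
                (fun acc h => dfsA dayH pattern fuel (hours - h) (days - 1)
                  (path ++ PySem.Int.toChars h) acc) ans
            else dfsA dayH pattern fuel hours days (path ++ [c]) ans := by
        rw [dfsA, hget]
      rw [hred]
      by_cases hprune : dayH * days < hours
      · rw [if_pos hprune]
        by_cases hE : pvE dayH (wk.drop (7 - (fuel+1))) hours = []
        · rw [hE]; simp
        · exfalso
          obtain ⟨hb1, hb2⟩ := pvE_bound dayH _ hours hE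
          set cS := (((wk.drop (7 - (fuel+1))).count '?' : Nat) : Int) with hcS
          have hcS0 : 0 ≤ cS := by rw [hcS]; exact Int.natCast_nonneg _
          rw [hdays] at hprune
          by_cases hd : 0 ≤ dayH
          · have hmono : dayH * cS ≤ dayH * (cS + q) := by nlinarith
            linarith
          · have hdneg : dayH < 0 := by omega
            have h1 : dayH * cS ≤ 0 := mul_nonpos_of_nonpos_of_nonneg (by omega) hcS0
            have hhours0 : hours = 0 := by linarith
            have hcs0 : cS = 0 := by
              by_contra hne
              have h2 : (1 : Int) ≤ cS := by omega
              have h3 : dayH * cS ≤ dayH * 1 := mul_le_mul_of_nonpos_left h2 (by omega)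
              linarith
            rcases hH with hH | hH | hH | hH
            · exact hd hH
            · rw [hH, hcs0] at hprune
              simp at hprune
              omega
            · have h4 := List.count_pos_iff.mpr hH
              omega
            · exact hH hhours0
      · rw [if_neg hprune]
        by_cases hcq : c = '?'
        · rw [if_pos hcq]
          by_cases hd : 0 ≤ dayH
          · have hstep : ∀ (acc : List (List Char)) (h : Int),
                h ∈ PySem.List.pyRange 0 (min (dayH + 1) (hours + 1)) 1 →
                dfsA dayH pattern fuel (hours - h) (days - 1) (path ++ PySem.Int.toChars h) acc
                  = acc ++ (pvE dayH (wk.drop (7 - fuel)) (hours - h)).map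
                      (fun s => (path ++ PySem.Int.toChars h) ++ s) := by
              intro acc h hm
              apply ih hf
              · rw [hdays, hcount, hcq]
                simp only [List.count_cons_self]
                push_cast
                ring
              · exact Or.inl hd
            rw [PySem.List.foldl_congr_mem _ _
              (fun acc h => acc ++ (pvE dayH (wk.drop (7 - fuel)) (hours - h)).map
                      (fun s => (path ++ PySem.Int.toChars h) ++ s)) _ hstep]
            rw [PySem.List.foldl_append_eq_flatMap]
            rw [hsplit, pvE, if_pos hcq, List.map_flatMap]
            apply congrArg
            refine List.flatMap_congr (fun x hx => ?_)
            simp [Function.comp_def, List.append_assoc, ← hwkdef]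
          · have hmin0 : min (dayH + 1) (hours + 1) ≤ 0 := by omega
            rw [PySem.List.pyRange_one_eq_nil hmin0, List.foldl_nil]
            rw [hsplit, pvE, if_pos hcq, PySem.List.pyRange_one_eq_nil hmin0]
            simp
        · rw [if_neg hcq]
          rw [ih hf hours days (path ++ [c]) ans]
          · rw [hsplit, pvE, if_neg hcq, List.map_map]
            apply congrArg
            apply List.map_congr_left
            intro s hs
            simp
          · rw [hdays, hcount, List.count_cons_of_ne (fun he => hcq he)]
          · rcases hH with hH | hH | hH | hH
            · exact Or.inl hH
            · exact Or.inr (Or.inl hH)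
            · refine Or.inr (Or.inr (Or.inl ?_))
              rw [hsplit, List.mem_cons] at hH
              rcases hH with hH | hH
              · exact absurd hH.symm hcq
              · exact hH
            · exact Or.inr (Or.inr (Or.inr hH))

lemma preamble_eq (pattern : String) :
    pattern.toList.foldl (fun (p : Int × Int) d =>
      if d = '?' then (p.1 + 1, p.2)
      else (p.1, p.2 + (PySem.Int.ofStr? (String.ofList [d])).getD 0)) (0, 0)
    = ((pattern.toList.count '?' : Int),
       pattern.toList.foldl
         (fun a d => if d ≠ '?' then a + (PySem.Int.ofStr? (String.ofList [d])).getD 0 else a) 0) := by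
  have h1 : (fun (p : Int × Int) d =>
      if d = '?' then (p.1 + 1, p.2)
      else (p.1, p.2 + (PySem.Int.ofStr? (String.ofList [d])).getD 0))
    = fun (p : Int × Int) d =>
        ((fun (a : Int) d => if d = '?' then a + 1 else a) p.1 d,
         (fun (a : Int) d => if d ≠ '?' then a + (PySem.Int.ofStr? (String.ofList [d])).getD 0 else a) p.2 d) := by
    funext p d
    by_cases h : d = '?' <;> simp [h]
  rw [h1, PySem.List.foldl_prod_mk
    (f := fun (a : Int) d => if d = '?' then a + 1 else a)
    (g := fun (a : Int) d => if d ≠ '?' then a + (PySem.Int.ofStr? (String.ofList [d])).getD 0 else a)]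
  congr 1
  rw [PySem.List.foldl_ite_add_one (p := fun d => d = '?')]
  simp only [zero_add, Int.natCast_inj]
  apply List.countP_congr
  intro x _
  by_cases h : x = '?' <;> simp [h]

lemma main_eq (wh dH : Int) (pat : String)
    (hlen : 7 ≤ pat.toList.length) :
    findSchedules wh dH pat = findSchedules_alt wh dH pat := by
  simp only [findSchedules, preamble_eq]
  set alloc := pat.toList.foldl
    (fun a d => if d ≠ '?' then a + (PySem.Int.ofStr? (String.ofList [d])).getD 0 else a) 0 with halloc
  by_cases hguard : dH * (pat.toList.count '?' : Int) < wh - alloc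
  · -- A's first prune fires immediately; B's early-exit fires on the same condition
    have hA : dfsA dH pat 7 (wh - alloc) (pat.toList.count '?' : Int) [] [] = [] := by
      rw [show (7:Nat) = 6+1 from rfl, dfsA, if_pos hguard]
    rw [hA]
    unfold findSchedules_alt
    rw [if_pos hguard]
    rfl
  · set q : Int := (pat.toList.count '?' : Int) - ((pat.toList.take 7).count '?' : Int) with hqdef
    have hcnt_split : pat.toList.count '?'
        = (pat.toList.take 7).count '?' + (pat.toList.drop 7).count '?' := by
      conv_lhs => rw [← List.take_append_drop 7 pat.toList]
      rw [List.count_append]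
    have hq : 0 ≤ q := by rw [hqdef]; omega
    have hdays : (pat.toList.count '?' : Int)
        = (((pat.toList.take 7).drop (7 - 7)).count '?' : Int) + q := by
      simp only [Nat.sub_self, List.drop_zero]
      rw [hqdef]; ring
    have hH : 0 ≤ dH ∨ q = 0 ∨ '?' ∈ (pat.toList.take 7).drop (7 - 7) ∨ wh - alloc ≠ 0 := by
      simp only [Nat.sub_self, List.drop_zero]
      by_cases hd : 0 ≤ dH
      · exact Or.inl hd
      · have hdneg : dH < 0 := by omega
        by_cases hc0 : pat.toList.count '?' = 0
        · refine Or.inr (Or.inl ?_)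
          rw [hqdef]
          have : (pat.toList.take 7).count '?' = 0 := by omega
          omega
        · -- count ≥ 1 and dH < 0: ¬guard gives wh - alloc ≤ dH * count < 0
          refine Or.inr (Or.inr (Or.inr ?_))
          have hc1 : (1 : Int) ≤ (pat.toList.count '?' : Int) := by
            have : 1 ≤ pat.toList.count '?' := by omega
            exact_mod_cast this
          have h3 : dH * (pat.toList.count '?' : Int) ≤ dH * 1 :=
            mul_le_mul_of_nonpos_left hc1 (by omega)
          have : wh - alloc ≤ dH * (pat.toList.count '?' : Int) := by omega
          intro h0
          rw [h0] at this
          linarith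
    rw [dfsA_eq dH pat q hq hlen 7 (le_refl 7) (wh - alloc) _ [] [] hdays hH]
    rw [alt_eq wh dH pat (by rw [← halloc]; exact hguard)]
    simp only [Nat.sub_self, List.drop_zero, List.nil_append, List.map_map]
    simp only [Function.comp_def, List.nil_append]
    rw [← halloc]

set_option maxRecDepth 100000 in
lemma ofStr_digit (c : Char) (h0 : 48 ≤ c.toNat) (h9 : c.toNat ≤ 57) :
    PySem.Int.ofStr? (String.ofList [c]) = some ((c.toNat : Int) - 48) := by
  have hcases : c.toNat = 48 ∨ c.toNat = 49 ∨ c.toNat = 50 ∨ c.toNat = 51 ∨ c.toNat = 52 ∨ c.toNat = 53 ∨ c.toNat = 54 ∨ c.toNat = 55 ∨ c.toNat = 56 ∨ c.toNat = 57 := by omega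
  rcases hcases with h|h|h|h|h|h|h|h|h|h
  · rw [show c = '0' from Char.ext (UInt32.toNat_inj.mp h)]; decide
  · rw [show c = '1' from Char.ext (UInt32.toNat_inj.mp h)]; decide
  · rw [show c = '2' from Char.ext (UInt32.toNat_inj.mp h)]; decide
  · rw [show c = '3' from Char.ext (UInt32.toNat_inj.mp h)]; decide
  · rw [show c = '4' from Char.ext (UInt32.toNat_inj.mp h)]; decide
  · rw [show c = '5' from Char.ext (UInt32.toNat_inj.mp h)]; decide
  · rw [show c = '6' from Char.ext (UInt32.toNat_inj.mp h)]; decide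
  · rw [show c = '7' from Char.ext (UInt32.toNat_inj.mp h)]; decide
  · rw [show c = '8' from Char.ext (UInt32.toNat_inj.mp h)]; decide
  · rw [show c = '9' from Char.ext (UInt32.toNat_inj.mp h)]; decide

lemma alloc_eq_digitsum (pattern : String)
    (hchars : ∀ c ∈ pattern.toList, c = '?' ∨ (48 ≤ c.toNat ∧ c.toNat ≤ 57)) :
    pattern.toList.foldl
      (fun a d => if d ≠ '?' then a + (PySem.Int.ofStr? (String.ofList [d])).getD 0 else a) 0
      = pvAlloc pattern := by
  unfold pvAlloc
  rw [PySem.List.foldl_ite_eq_foldl_filter (p := fun d => d ≠ '?')]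
  apply PySem.List.foldl_congr_mem
  intro acc d hd
  have hdm : d ∈ pattern.toList := List.mem_of_mem_filter hd
  have hne : d ≠ '?' := by simpa using List.of_mem_filter hd
  rcases hchars d hdm with h | h
  · exact absurd h hne
  · rw [ofStr_digit d h.1 h.2]
    rfl

-- on a short pattern with negative remaining hours and a '?' day ahead, every DFS branch dies
-- before reaching the end of the pattern, so nothing is appended
lemma dfsA_dead (dayH : Int) (pattern : String) (hL : pattern.toList.length < 7) :
    ∀ fuel, fuel ≤ 7 → ∀ hours days path ans, hours < 0 →
      '?' ∈ pattern.toList.drop (7 - fuel) →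
      dfsA dayH pattern fuel hours days path ans = ans := by
  intro fuel
  induction fuel with
  | zero =>
      intro _ hours days path ans _ hmem
      exfalso
      rw [List.drop_eq_nil_of_le (by omega)] at hmem
      simp at hmem
  | succ fuel ih =>
      intro hle hours days path ans hh hmem
      have hlt : 7 - (fuel+1) < pattern.toList.length := by
        by_contra h
        rw [List.drop_eq_nil_of_le (by omega)] at hmem
        simp at hmem
      set c : Char := pattern.toList[6 - fuel]'(by omega) with hcdef
      have hget : PySem.Str.pyGet? pattern ((6 - fuel : Nat) : Int) = some c := by
        rw [PySem.Str.pyGet?_natCast, List.getElem?_eq_getElem (by omega)]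
      have hred : dfsA dayH pattern (fuel+1) hours days path ans
          = if dayH * days < hours then ans
            else if c = '?' then
              (PySem.List.pyRange 0 (min (dayH + 1) (hours + 1)) 1).foldl
                (fun acc h => dfsA dayH pattern fuel (hours - h) (days - 1)
                  (path ++ PySem.Int.toChars h) acc) ans
            else dfsA dayH pattern fuel hours days (path ++ [c]) ans := by
        rw [dfsA, hget]
      rw [hred]
      by_cases hprune : dayH * days < hours
      · rw [if_pos hprune]
      · rw [if_neg hprune]
        have hsplit : pattern.toList.drop (7 - (fuel+1)) = c :: pattern.toList.drop (7 - fuel) := by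
          rw [show 7 - (fuel+1) = 6 - fuel from by omega, show 7 - fuel = (6 - fuel) + 1 from by omega]
          exact List.drop_eq_getElem_cons (by omega)
        by_cases hcq : c = '?'
        · rw [if_pos hcq, PySem.List.pyRange_one_eq_nil (by omega), List.foldl_nil]
        · rw [if_neg hcq]
          apply ih (by omega) hours days _ ans hh
          rw [hsplit] at hmem
          rcases List.mem_cons.mp hmem with h | h
          · exact absurd h.symm hcq
          · exact h

lemma short_eq (wh dH : Int) (pat : String)
    (hchars : ∀ c ∈ pat.toList, c = '?' ∨ (48 ≤ c.toNat ∧ c.toNat ≤ 57))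
    (hL : pat.toList.length < 7)
    (hrest : dH * (pat.toList.count '?' : Int) < wh - pvAlloc pat ∨
      (1 ≤ pat.toList.count '?' ∧ (dH < 0 ∨ wh - pvAlloc pat < 0))) :
    findSchedules wh dH pat = findSchedules_alt wh dH pat := by
  have halloc := alloc_eq_digitsum pat hchars
  simp only [findSchedules, preamble_eq]
  by_cases hguard : dH * (pat.toList.count '?' : Int)
      < wh - pat.toList.foldl
          (fun a d => if d ≠ '?' then a + (PySem.Int.ofStr? (String.ofList [d])).getD 0 else a) 0
  · have hA : dfsA dH pat 7 (wh - pat.toList.foldl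
        (fun a d => if d ≠ '?' then a + (PySem.Int.ofStr? (String.ofList [d])).getD 0 else a) 0)
        (pat.toList.count '?' : Int) [] [] = [] := by
      rw [show (7:Nat) = 6+1 from rfl, dfsA, if_pos hguard]
    rw [hA]
    unfold findSchedules_alt
    rw [if_pos hguard]
    rfl
  · rw [halloc] at hguard
    have hrest2 : 1 ≤ pat.toList.count '?' ∧ (dH < 0 ∨ wh - pvAlloc pat < 0) := by
      rcases hrest with h | h
      · exact absurd h hguard
      · exact h
    have hc1 : (1 : Int) ≤ (pat.toList.count '?' : Int) := by exact_mod_cast hrest2.1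
    have hneed : wh - pvAlloc pat < 0 := by
      rcases hrest2.2 with h | h
      · have h2 : dH * (pat.toList.count '?' : Int) ≤ dH * 1 :=
          mul_le_mul_of_nonpos_left hc1 (le_of_lt h)
        have h3 : wh - pvAlloc pat ≤ dH * (pat.toList.count '?' : Int) := by omega
        linarith
      · exact h
    have hmem : '?' ∈ pat.toList := List.count_pos_iff.mp (by omega)
    rw [halloc]
    rw [dfsA_dead dH pat hL 7 (le_refl 7) _ _ [] [] hneed (by simpa using hmem)]
    rw [alt_eq wh dH pat (by rw [halloc]; exact hguard), halloc]
    have hE : pvE dH (pat.toList.take 7) (wh - pvAlloc pat) = [] := by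
      by_contra h
      have := (pvE_bound dH _ _ h).1
      omega
    rw [hE]

-- ===== VERDICT (by name: the statement is the Claim_ definition above) =====
theorem findSchedules_spec : Claim_equal_findSchedules := by
  intro wh dH pat _hdom hpre
  unfold Spec_findSchedules
  obtain ⟨hcs, hcase⟩ := hpre
  by_cases hlen : 7 ≤ pat.toList.length
  · exact main_eq wh dH pat hlen
  · have hchars : ∀ c ∈ pat.toList, c = '?' ∨ (48 ≤ c.toNat ∧ c.toNat ≤ 57) := by
      intro c hc
      have := List.all_eq_true.mp hcs c hc
      simp at this
      tauto
    rcases hcase with h | h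
    · exact absurd h hlen
    · exact short_eq wh dH pat hchars (by omega) h
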